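-- pv_equiv track=rewrite | github.com/bellafaulk/CS4346-Image-Classification | src/features/feature_extractor.py | grid_feature
-- ===== SOURCE A (Python) =====
-- BACKGROUND = ' ' #this will represent the empty space of pixels
--
-- def _is_marked(char):
--     return 1 if char != BACKGROUND else 0
--
-- def grid_feature(image_grid, grid_rows = 14, grid_cols = 6):# image grid: the list of str of the parsed image
--                                                             # gird_rows: integer of how many rows to divide the image
--                                                             # GRID_cols: inters of how many columes to divide
-- # getting the actual dimesnions of the image from the grid itself, the rows and columns respectfully
--     img_height = len(image_grid)
--     img_width = len(image_grid[0])
-- #calculating how many rows/cols to be in each block, for the heigh and width respectfully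
--     block_height = img_height // grid_rows
--     block_width = img_width // grid_cols
-- #capsizes each vblock to 1 so we wont get divisions errors, also iif the frid is alrger than the image
--     block_height = max(block_height, 1)
--     block_width = max(block_width, 1)
--
--     features = []# this will store one value per grid block in a list
-- #tthis loop over each block by its grid position respectfully, gr is the row and gc is the column
--     for gr in range(grid_rows):
--         for gc in range(grid_cols):
-- #Calculating the pixel range in order to see what the block covers
-- #row starts from row times the height up to the sum of the start and height
--             row_start = gr * block_height
--             row_end = row_start + block_height
-- #column starts at the column time the width of the block up to the sum of the start and height
--             col_start = gc * block_width
--             col_end = col_start + block_width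
-- #this will strictly make the end of the indices so they never go past the images borders
--             row_end = min(row_end, img_height)
--             col_end = min(col_end, img_width)
--
--             block_is_marked = 0 #start as inactive by setting it to 0
--
--             for r in range(row_start, row_end):#checking every pixel insisde the block if any pixel is marked the whole block will be active(1)
--                 for c in range(col_start, col_end):
--                     if _is_marked(image_grid[r][c]):
--                         block_is_marked = 1
--                         break# no need to check more pixels antymore
--
--                 if block_is_marked:
--                     break#no more checking on the row for this block
--
--             features.append(block_is_marked)
--     return features# this will return a list of 1 and 0
-- ===== SOURCE B (Python) =====
-- BACKGROUND = ' '
--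
-- def grid_feature(image_grid, grid_rows=14, grid_cols=6):
--     # Alternative: per-row prefix counts of marked pixels, then each block is a
--     # sum of prefix differences (no per-pixel scan inside the block loop).
--     img_height = len(image_grid)
--     img_width = len(image_grid[0])
--     block_height = max(img_height // grid_rows, 1)
--     block_width = max(img_width // grid_cols, 1)
--
--     # pref[r][k] = number of non-background pixels among the first k of row r
--     pref = []
--     for row in image_grid:
--         p = [0]
--         for c in range(img_width):
--             p.append(p[c] + (1 if row[c] != BACKGROUND else 0))
--         pref.append(p)
--
--     features = []
--     for grow in range(grid_rows):
--         row_start = grow * block_height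
--         row_end = min(row_start + block_height, img_height)
--         for gcol in range(grid_cols):
--             col_start = gcol * block_width
--             col_end = min(col_start + block_width, img_width)
--             col_start = min(col_start, col_end)  # clamp into the prefix table
--             cnt = 0
--             for r in range(row_start, row_end):
--                 cnt += pref[r][col_end] - pref[r][col_start]
--             features.append(1 if cnt > 0 else 0)
--     return features
-- ===== Notes on version B (the rewrite author's own statement) =====
-- stated objective: alternative
-- what changed: Replaces the per-pixel triple-nested scan with early-exit breaks by a one-pass per-row prefix-count table, after which each block's mark count is a sum of prefix differences over its rows (no inner column loop).
-- outside the precondition, e.g. on grid_feature(['ab', 'c'], 2, 1): A returns [1, 1], B raises IndexError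
import Mathlib
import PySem

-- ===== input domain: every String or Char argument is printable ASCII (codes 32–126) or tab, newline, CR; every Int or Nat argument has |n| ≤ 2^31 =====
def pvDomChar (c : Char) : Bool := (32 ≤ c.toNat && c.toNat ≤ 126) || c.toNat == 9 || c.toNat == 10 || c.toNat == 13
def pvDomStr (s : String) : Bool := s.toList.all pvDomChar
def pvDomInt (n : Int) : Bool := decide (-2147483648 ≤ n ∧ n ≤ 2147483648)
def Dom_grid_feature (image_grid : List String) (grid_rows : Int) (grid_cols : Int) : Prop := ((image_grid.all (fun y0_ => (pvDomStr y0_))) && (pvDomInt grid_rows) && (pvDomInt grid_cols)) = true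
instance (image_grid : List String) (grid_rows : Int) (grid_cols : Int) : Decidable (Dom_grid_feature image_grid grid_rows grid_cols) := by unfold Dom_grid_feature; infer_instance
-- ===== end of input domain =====

-- B replaces A's per-pixel block scan with a per-row prefix-count table plus
-- prefix differences per block (alternative decomposition, similar cost).

-- ===== PORT A =====
def pv_is_marked (c : Char) : Int := if c ≠ ' ' then 1 else 0

-- inner 'for c in range(col_start, col_end)' with its break
def pvAcols (row : String) (cols : List Int) : Int :=
  match cols with
  | [] => 0
  | c :: rest =>
    if pv_is_marked ((PySem.Str.pyGet? row c).getD ' ') ≠ 0 then 1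
    else pvAcols row rest

-- outer 'for r in range(row_start, row_end)' with its break
def pvArows (image_grid : List String) (rows : List Int) (cs ce : Int) : Int :=
  match rows with
  | [] => 0
  | r :: rest =>
    let b := pvAcols (PySem.List.pyGetD image_grid r "") (PySem.List.pyRange cs ce 1)
    if b ≠ 0 then b else pvArows image_grid rest cs ce

def grid_feature (image_grid : List String) (grid_rows : Int) (grid_cols : Int) : List Int :=
  let img_height : Int := image_grid.length
  let img_width : Int := PySem.Str.len (PySem.List.pyGetD image_grid 0 "")
  let block_height := max (PySem.Int.floordiv img_height grid_rows) 1
  let block_width := max (PySem.Int.floordiv img_width grid_cols) 1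
  (PySem.List.pyRange 0 grid_rows 1).foldl (fun features gr =>
    (PySem.List.pyRange 0 grid_cols 1).foldl (fun features gc =>
      let row_start := gr * block_height
      let row_end := min (row_start + block_height) img_height
      let col_start := gc * block_width
      let col_end := min (col_start + block_width) img_width
      features ++ [pvArows image_grid (PySem.List.pyRange row_start row_end 1) col_start col_end])
      features) []

-- ===== PORT B =====
-- p.append(p[c] + (1 if row[c] != BACKGROUND else 0)) for c in range(img_width)
def pvPrefRow (row : String) (img_width : Int) : List Int :=
  (PySem.List.pyRange 0 img_width 1).foldl
    (fun p c =>
      p ++ [PySem.List.pyGetD p c 0 +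
            (if (PySem.Str.pyGet? row c).getD ' ' ≠ ' ' then 1 else 0)]) [0]

def grid_feature_alt (image_grid : List String) (grid_rows : Int) (grid_cols : Int) : List Int :=
  let img_height : Int := image_grid.length
  let img_width : Int := PySem.Str.len (PySem.List.pyGetD image_grid 0 "")
  let block_height := max (PySem.Int.floordiv img_height grid_rows) 1
  let block_width := max (PySem.Int.floordiv img_width grid_cols) 1
  let pref : List (List Int) := image_grid.map (fun row => pvPrefRow row img_width)
  (PySem.List.pyRange 0 grid_rows 1).foldl (fun features gr =>
    let row_start := gr * block_height
    let row_end := min (row_start + block_height) img_height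
    (PySem.List.pyRange 0 grid_cols 1).foldl (fun features gc =>
      let col_start0 := gc * block_width
      let col_end := min (col_start0 + block_width) img_width
      let col_start := min col_start0 col_end
      let cnt := (PySem.List.pyRange row_start row_end 1).foldl
        (fun cnt r =>
          cnt + (PySem.List.pyGetD (PySem.List.pyGetD pref r []) col_end 0 -
                 PySem.List.pyGetD (PySem.List.pyGetD pref r []) col_start 0)) 0
      features ++ [if 0 < cnt then 1 else 0]) features) []

-- ===== PRECONDITION & SPEC =====
-- Pre_ excludes: grid_rows = 0 / grid_cols = 0 (A raises ZeroDivisionError), empty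
-- image_grid (A raises IndexError), and ragged grids with a row shorter than the
-- first: there A raises IndexError except when block geometry accidentally skips
-- the short region (B's prefix pass always reads every row up to the first row's
-- width, so it raises on all of them); see cites for an excluded input A returns on.
def Pre_grid_feature (image_grid : List String) (grid_rows : Int) (grid_cols : Int) : Prop :=
  image_grid ≠ [] ∧ grid_rows ≠ 0 ∧ grid_cols ≠ 0 ∧
    ∀ s ∈ image_grid, PySem.Str.len (image_grid.headD "") ≤ PySem.Str.len s
instance (image_grid : List String) (grid_rows : Int) (grid_cols : Int) : Decidable (Pre_grid_feature image_grid grid_rows grid_cols) := by unfold Pre_grid_feature; infer_instance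

def pvWitness_grid_feature : List String × Int × Int := (["x ", "  "], 2, 2)

def Spec_grid_feature (image_grid : List String) (grid_rows : Int) (grid_cols : Int) (out : List Int) : Prop := out = grid_feature_alt image_grid grid_rows grid_cols
instance (image_grid : List String) (grid_rows : Int) (grid_cols : Int) (out : List Int) : Decidable (Spec_grid_feature image_grid grid_rows grid_cols out) := by unfold Spec_grid_feature; infer_instance

-- ===== CLAIM (what is proved, stated in full; the proofs are below) =====
def Claim_equal_grid_feature : Prop := ∀ (image_grid : List String) (grid_rows : Int) (grid_cols : Int), Dom_grid_feature image_grid grid_rows grid_cols → Pre_grid_feature image_grid grid_rows grid_cols → Spec_grid_feature image_grid grid_rows grid_cols (grid_feature image_grid grid_rows grid_cols)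

-- ===== LEMMAS AND PROOFS =====

-- mark indicator and range-counts of marked pixels (proof-side notions)
def pvM (row : String) (c : Int) : Int :=
  if (PySem.Str.pyGet? row c).getD ' ' ≠ ' ' then 1 else 0

def pvP (row : String) (a b : Int) : Int :=
  ((PySem.List.pyRange a b 1).map (pvM row)).sum

theorem pvM_nonneg (row : String) (c : Int) : 0 ≤ pvM row c := by
  unfold pvM; split <;> norm_num

theorem pvSum_nonneg (row : String) (L : List Int) :
    0 ≤ (L.map (pvM row)).sum := by
  induction L with
  | nil => simp
  | cons c rest ih => simpa using add_nonneg (pvM_nonneg row c) ih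

theorem pvP_nonneg (row : String) (a b : Int) : 0 ≤ pvP row a b :=
  pvSum_nonneg row _

theorem pvP_succ (row : String) (n : Int) (hn : 0 ≤ n) :
    pvP row 0 (n + 1) = pvP row 0 n + pvM row n := by
  unfold pvP
  rw [PySem.List.pyRange_one_succ_right hn, List.map_append]
  simp

theorem pvAcols_eq (row : String) (L : List Int) :
    pvAcols row L = if 0 < (L.map (pvM row)).sum then 1 else 0 := by
  induction L with
  | nil => simp [pvAcols]
  | cons c rest ih =>
    by_cases h : (PySem.List.pyGet? row.toList c).getD ' ' = ' '
    · simp [pvAcols, pv_is_marked, pvM, h, ih]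
    · have hpos : (0:Int) < 1 + (rest.map (pvM row)).sum := by
        have := pvSum_nonneg row rest; omega
      simp [pvAcols, pv_is_marked, pvM, h, hpos]

theorem pvArowsSum_nonneg (image_grid : List String) (L : List Int) (cs ce : Int) :
    0 ≤ (L.map (fun r => pvP (PySem.List.pyGetD image_grid r "") cs ce)).sum := by
  induction L with
  | nil => simp
  | cons r rest ih =>
    simpa using add_nonneg (pvP_nonneg (PySem.List.pyGetD image_grid r "") cs ce) ih

theorem pvArows_eq (image_grid : List String) (L : List Int) (cs ce : Int) :
    pvArows image_grid L cs ce =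
      if 0 < (L.map (fun r => pvP (PySem.List.pyGetD image_grid r "") cs ce)).sum
      then 1 else 0 := by
  induction L with
  | nil => simp [pvArows]
  | cons r rest ih =>
    have hc : pvAcols (PySem.List.pyGetD image_grid r "") (PySem.List.pyRange cs ce 1)
        = if 0 < pvP (PySem.List.pyGetD image_grid r "") cs ce then 1 else 0 :=
      pvAcols_eq (PySem.List.pyGetD image_grid r "") (PySem.List.pyRange cs ce 1)
    simp only [pvArows, hc, List.map_cons, List.sum_cons]
    by_cases h : 0 < pvP (PySem.List.pyGetD image_grid r "") cs ce
    · have hpos : 0 < pvP (PySem.List.pyGetD image_grid r "") cs ce +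
          (rest.map (fun r => pvP (PySem.List.pyGetD image_grid r "") cs ce)).sum := by
        have := pvArowsSum_nonneg image_grid rest cs ce; omega
      simp [h, hpos]
    · have h0 : pvP (PySem.List.pyGetD image_grid r "") cs ce = 0 := by
        have := pvP_nonneg (PySem.List.pyGetD image_grid r "") cs ce; omega
      simp [h0, ih]

-- the prefix row is exactly the table of pvP row 0 k, k = 0..W
theorem pvPrefRow_natCast (row : String) (n : Nat) :
    pvPrefRow row (n : Int) =
      (PySem.List.pyRange 0 ((n : Int) + 1) 1).map (fun k => pvP row 0 k) := by
  induction n with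
  | zero =>
    have h1 : PySem.List.pyRange (0:Int) (((0:Nat):Int) + 1) 1 = [0] := by
      simpa using PySem.List.pyRange_one_singleton (0:Int)
    rw [h1]
    simp [pvPrefRow, pvP, PySem.List.pyRange_one_eq_nil]
  | succ n ih =>
    have hc : ((n + 1 : Nat) : Int) = (n : Int) + 1 := by push_cast; ring
    rw [hc]
    unfold pvPrefRow at ih ⊢
    rw [PySem.List.pyRange_one_succ_right (show (0:Int) ≤ (n : Int) by positivity),
      List.foldl_append, ih]
    simp only [List.foldl_cons, List.foldl_nil]
    rw [PySem.List.pyGetD_map_pyRange_of_nonneg (fun k => pvP row 0 k) ((n : Int) + 1)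
      (n : Int) 0 (by positivity) (by omega)]
    rw [PySem.List.pyRange_one_succ_right (show (0:Int) ≤ (n : Int) + 1 by positivity),
      List.map_append]
    simp [pvP_succ row (n : Int) (by positivity), pvM]

theorem pvPrefRow_getD (row : String) (W k : Int) (hW : 0 ≤ W) (h0 : 0 ≤ k) (hk : k ≤ W) :
    PySem.List.pyGetD (pvPrefRow row W) k 0 = pvP row 0 k := by
  obtain ⟨n, rfl⟩ := Int.eq_ofNat_of_zero_le hW
  rw [pvPrefRow_natCast,
    PySem.List.pyGetD_map_pyRange_of_nonneg (fun k => pvP row 0 k) ((n : Int) + 1) k 0 h0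
      (by omega)]

-- prefix difference = count over the block's column range
theorem pvP_diff (row : String) (cs ce : Int) (hcs : 0 ≤ cs) :
    pvP row 0 ce - pvP row 0 (min cs ce) = pvP row cs ce := by
  rcases le_or_gt cs ce with h | h
  · rw [min_eq_left h]
    have : pvP row 0 ce = pvP row 0 cs + pvP row cs ce := by
      unfold pvP
      rw [PySem.List.pyRange_one_append 0 cs ce hcs h, List.map_append, List.sum_append]
    omega
  · rw [min_eq_right (le_of_lt h)]
    have : pvP row cs ce = 0 := by
      unfold pvP
      rw [PySem.List.pyRange_one_eq_nil (le_of_lt h)]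
      simp
    omega

-- B's per-block count equals the sum of pvP over the block's rows
theorem pvCnt_eq (image_grid : List String) (W rs re cs ce : Int)
    (hrs : 0 ≤ rs) (hre : re ≤ (image_grid.length : Int))
    (hcs : 0 ≤ cs) (hce0 : 0 ≤ ce) (hce : ce ≤ W) :
    (PySem.List.pyRange rs re 1).foldl
      (fun cnt r =>
        cnt + (PySem.List.pyGetD (PySem.List.pyGetD (image_grid.map (fun row => pvPrefRow row W)) r []) ce 0 -
               PySem.List.pyGetD (PySem.List.pyGetD (image_grid.map (fun row => pvPrefRow row W)) r []) (min cs ce) 0)) 0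
    = ((PySem.List.pyRange rs re 1).map
        (fun r => pvP (PySem.List.pyGetD image_grid r "") cs ce)).sum := by
  rw [PySem.List.foldl_add]
  rw [zero_add]
  congr 1
  apply List.map_congr_left
  intro r hr
  rw [PySem.List.mem_pyRange_one] at hr
  have hr0 : 0 ≤ r := le_trans hrs hr.1
  have hrlen : r < (image_grid.length : Int) := lt_of_lt_of_le hr.2 hre
  have hmap : PySem.List.pyGetD (image_grid.map (fun row => pvPrefRow row W)) r []
      = pvPrefRow (PySem.List.pyGetD image_grid r "") W := by
    rw [PySem.List.pyGetD_eq_getElem _ _ hr0 (by simpa using hrlen),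
        PySem.List.pyGetD_eq_getElem _ _ hr0 (by simpa using hrlen)]
    simp
  rw [hmap,
    pvPrefRow_getD _ W ce (le_trans hce0 hce) hce0 hce,
    pvPrefRow_getD _ W (min cs ce) (le_trans hce0 hce) (le_min hcs hce0) (le_trans (min_le_right cs ce) hce),
    pvP_diff _ cs ce hcs]

-- per-block equality
theorem pvBlock_eq (image_grid : List String) (W rs re cs ce : Int)
    (hrs : 0 ≤ rs) (hre : re ≤ (image_grid.length : Int))
    (hcs : 0 ≤ cs) (hce0 : 0 ≤ ce) (hce : ce ≤ W) :
    pvArows image_grid (PySem.List.pyRange rs re 1) cs ce =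
      (if 0 < (PySem.List.pyRange rs re 1).foldl
        (fun cnt r =>
          cnt + (PySem.List.pyGetD (PySem.List.pyGetD (image_grid.map (fun row => pvPrefRow row W)) r []) ce 0 -
                 PySem.List.pyGetD (PySem.List.pyGetD (image_grid.map (fun row => pvPrefRow row W)) r []) (min cs ce) 0)) 0
      then 1 else 0) := by
  rw [pvCnt_eq image_grid W rs re cs ce hrs hre hcs hce0 hce, pvArows_eq]

-- ===== VERDICT (by name: the statement is the Claim_ definition above) =====
theorem grid_feature_spec : Claim_equal_grid_feature := by
  intro image_grid grid_rows grid_cols _hdom _hpre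
  unfold Spec_grid_feature grid_feature grid_feature_alt
  apply PySem.List.foldl_congr_mem
  intro acc gr hgr
  rw [PySem.List.mem_pyRange_one] at hgr
  apply PySem.List.foldl_congr_mem
  intro acc2 gc hgc
  rw [PySem.List.mem_pyRange_one] at hgc
  dsimp only
  congr 1
  congr 1
  have hbh : (1:Int) ≤ max (PySem.Int.floordiv (image_grid.length : Int) grid_rows) 1 :=
    le_max_right _ _
  have hbw : (1:Int) ≤ max (PySem.Int.floordiv (PySem.Str.len (PySem.List.pyGetD image_grid 0 "")) grid_cols) 1 :=
    le_max_right _ _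
  have hWnn : (0:Int) ≤ PySem.Str.len (PySem.List.pyGetD image_grid 0 "") := by
    rw [PySem.Str.len_eq]; positivity
  apply pvBlock_eq
  · exact mul_nonneg hgr.1 (le_trans zero_le_one hbh)
  · exact min_le_right _ _
  · exact mul_nonneg hgc.1 (le_trans zero_le_one hbw)
  · apply le_min
    · have : (0:Int) ≤ gc * _ := mul_nonneg hgc.1 (le_trans zero_le_one hbw)
      omega
    · exact hWnn
  · exact min_le_right _ _
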